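-- pv_equiv track=rewrite | github.com/Hamulda/DeepResearchTool | src/core/adaptive_query_refinement.py | _identify_missing_aspects
-- ===== SOURCE A (Python) =====
-- from typing import Dict, Any, List, Optional, Set, Tuple
--
-- def _identify_missing_aspects(query: str, results: List[Dict[str, Any]]) -> List[str]:
--     """Identify missing aspects using keyword analysis"""
--
--     # Common research aspects
--     aspect_keywords = {
--         "methodology": ["method", "approach", "technique", "procedure"],
--         "results": ["result", "finding", "outcome", "conclusion"],
--         "limitations": ["limitation", "constraint", "drawback", "issue"],
--         "future_work": ["future", "next", "recommend", "suggest"],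
--         "comparison": ["compare", "versus", "different", "alternative"]
--     }
--
--     # Check which aspects are missing from results
--     result_text = " ".join(r.get("content", "") for r in results).lower()
--     missing_aspects = []
--
--     for aspect, keywords in aspect_keywords.items():
--         if not any(keyword in result_text for keyword in keywords):
--             missing_aspects.append(aspect)
--
--     return missing_aspects
-- ===== SOURCE B (Python) =====
-- def _identify_missing_aspects(query, results):
--     """Identify missing aspects by one left-to-right scan of the result text:
--     at each position, mark every not-yet-found aspect one of whose keywords
--     starts exactly there (naive multi-pattern text scan instead of per-keyword
--     substring searches)."""
--     aspect_keywords = {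
--         "methodology": ["method", "approach", "technique", "procedure"],
--         "results": ["result", "finding", "outcome", "conclusion"],
--         "limitations": ["limitation", "constraint", "drawback", "issue"],
--         "future_work": ["future", "next", "recommend", "suggest"],
--         "comparison": ["compare", "versus", "different", "alternative"]
--     }
--     text = " ".join(r.get("content", "") for r in results).lower()
--     found = set()
--     for i in range(len(text)):
--         for aspect, keywords in aspect_keywords.items():
--             if aspect not in found and any(text.startswith(kw, i) for kw in keywords):
--                 found.add(aspect)
--     return [aspect for aspect in aspect_keywords if aspect not in found]
-- ===== Notes on version B (the rewrite author's own statement) =====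
-- stated objective: alternative
-- what changed: B replaces A's per-keyword substring searches ('kw in text' per aspect with early exit) by a single left-to-right scan of the text that at each position marks aspects whose keywords start exactly there (naive multi-pattern matching), then lists the unmarked aspects in dict order.
import Mathlib
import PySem

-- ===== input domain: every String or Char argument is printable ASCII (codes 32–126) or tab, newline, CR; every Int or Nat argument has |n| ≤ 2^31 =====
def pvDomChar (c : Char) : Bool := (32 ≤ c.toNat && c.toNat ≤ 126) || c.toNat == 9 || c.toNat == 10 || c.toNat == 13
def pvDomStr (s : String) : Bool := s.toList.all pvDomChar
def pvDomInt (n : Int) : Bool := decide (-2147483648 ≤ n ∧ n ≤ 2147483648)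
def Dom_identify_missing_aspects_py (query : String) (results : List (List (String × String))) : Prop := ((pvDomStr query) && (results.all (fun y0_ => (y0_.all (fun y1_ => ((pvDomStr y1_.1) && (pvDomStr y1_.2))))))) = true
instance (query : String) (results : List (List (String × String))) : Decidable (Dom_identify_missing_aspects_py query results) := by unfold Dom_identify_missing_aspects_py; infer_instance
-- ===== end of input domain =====

-- B scans the text once position by position, marking aspects whose keywords start there, instead of A's per-keyword substring searches; same result.
-- ===== PORT A =====
def pvAspects : List (String × List String) :=
  [("methodology", ["method", "approach", "technique", "procedure"]),
   ("results", ["result", "finding", "outcome", "conclusion"]),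
   ("limitations", ["limitation", "constraint", "drawback", "issue"]),
   ("future_work", ["future", "next", "recommend", "suggest"]),
   ("comparison", ["compare", "versus", "different", "alternative"])]

def identify_missing_aspects_py (query : String) (results : List (List (String × String))) : List String :=
  let result_text := PySem.Str.lower (PySem.Str.join " " (results.map (fun r => PySem.Dict.getD (PySem.Dict.mk r) "content" "")))
  pvAspects.foldl (fun missing p =>
    if !(p.2.any (fun kw => PySem.Str.isIn kw result_text)) then missing ++ [p.1] else missing) []

-- ===== PORT B ===== (the aspect-keyword table is shared data: pvAspects)
-- inner loop of Source B: at one position (suffix of the text), mark each not-yet-found aspect with a keyword starting there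
def pvMark (suffix : List Char) (found : PySem.Set String) : PySem.Set String :=
  pvAspects.foldl (fun f p =>
    if !(PySem.Set.contains f p.1) && p.2.any (fun kw => PySem.Chars.startswith suffix kw.toList)
    then PySem.Set.add f p.1 else f) found

-- outer loop of Source B: 'for i in range(len(text))' — one step per position, i.e. per nonempty suffix
def pvScan : List Char → PySem.Set String → PySem.Set String
  | [], found => found
  | c :: rest, found => pvScan rest (pvMark (c :: rest) found)

def identify_missing_aspects_py_alt (query : String) (results : List (List (String × String))) : List String :=
  let text := PySem.Str.lower (PySem.Str.join " " (results.map (fun r => PySem.Dict.getD (PySem.Dict.mk r) "content" "")))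
  let found := pvScan text.toList PySem.Set.empty
  (pvAspects.filter (fun p => !(PySem.Set.contains found p.1))).map Prod.fst

-- ===== PRECONDITION & SPEC =====
def Spec_identify_missing_aspects_py (query : String) (results : List (List (String × String))) (out : List String) : Prop := out = identify_missing_aspects_py_alt query results
instance (query : String) (results : List (List (String × String))) (out : List String) : Decidable (Spec_identify_missing_aspects_py query results out) := by unfold Spec_identify_missing_aspects_py; infer_instance

-- ===== CLAIM =====
def Claim_equal_identify_missing_aspects_py : Prop := ∀ (query : String) (results : List (List (String × String))), Dom_identify_missing_aspects_py query results → Spec_identify_missing_aspects_py query results (identify_missing_aspects_py query results)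

-- ===== LEMMAS AND PROOFS =====
-- aspect names are pairwise distinct, and every keyword is nonempty
lemma pv_names_inj : ∀ q ∈ pvAspects, ∀ p ∈ pvAspects, q.1 = p.1 → q = p := by decide

lemma pv_kw_ne_nil : ∀ p ∈ pvAspects, ∀ kw ∈ p.2, kw.toList ≠ [] := by decide

-- membership after the inner (per-position) loop
lemma pv_mark_mem (L : List (String × List String)) (s : List Char) (found : PySem.Set String) (x : String) :
    x ∈ L.foldl (fun f p =>
      if !(PySem.Set.contains f p.1) && p.2.any (fun kw => PySem.Chars.startswith s kw.toList)
      then PySem.Set.add f p.1 else f) found ↔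
    x ∈ found ∨ ∃ p ∈ L, p.1 = x ∧ p.2.any (fun kw => PySem.Chars.startswith s kw.toList) = true := by
  induction L generalizing found with
  | nil => simp
  | cons q L ih =>
    simp only [List.foldl_cons, ih, List.mem_cons]
    constructor
    · rintro (h | ⟨p, hp, rfl, hany⟩)
      · split_ifs at h with hcond
        · rcases (PySem.Set.mem_add _ _ _).1 h with h | rfl
          · exact Or.inl h
          · refine Or.inr ⟨q, Or.inl rfl, rfl, ?_⟩
            simp only [Bool.and_eq_true] at hcond
            exact hcond.2
        · exact Or.inl h
      · exact Or.inr ⟨p, Or.inr hp, rfl, hany⟩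
    · rintro (h | ⟨p, hp | hp, rfl, hany⟩)
      · left; split_ifs with hcond
        · exact (PySem.Set.mem_add _ _ _).2 (Or.inl h)
        · exact h
      · subst hp
        by_cases hc : PySem.Set.contains found p.1
        · left
          have hm : p.1 ∈ found := (PySem.Set.contains_iff _ _).1 hc
          split_ifs with hcond
          · exact (PySem.Set.mem_add _ _ _).2 (Or.inl hm)
          · exact hm
        · have hm : p.1 ∉ found := fun hmem => hc ((PySem.Set.contains_iff _ _).2 hmem)
          have : (!(PySem.Set.contains found p.1) && p.2.any (fun kw => PySem.Chars.startswith s kw.toList)) = true := by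
            simp [hm, hany]
          rw [this]
          left
          exact (PySem.Set.mem_add _ _ _).2 (Or.inr rfl)
      · exact Or.inr ⟨p, hp, rfl, hany⟩

-- membership after the whole scan: x was marked iff some keyword of an aspect named x starts at some position
lemma pv_scan_mem (cs : List Char) (found : PySem.Set String) (x : String) :
    x ∈ pvScan cs found ↔
    x ∈ found ∨ ∃ p ∈ pvAspects, p.1 = x ∧ ∃ t, t <:+ cs ∧ t ≠ [] ∧
      p.2.any (fun kw => PySem.Chars.startswith t kw.toList) = true := by
  induction cs generalizing found with
  | nil => simp [pvScan]
  | cons c rest ih =>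
    rw [pvScan, ih]
    unfold pvMark
    rw [pv_mark_mem]
    constructor
    · rintro ((h | ⟨p, hp, rfl, hany⟩) | ⟨p, hp, rfl, t, ht, htne, hany⟩)
      · exact Or.inl h
      · exact Or.inr ⟨p, hp, rfl, c :: rest, List.suffix_refl _, by simp, hany⟩
      · exact Or.inr ⟨p, hp, rfl, t, ht.trans (List.suffix_cons _ _), htne, hany⟩
    · rintro (h | ⟨p, hp, rfl, t, ht, htne, hany⟩)
      · exact Or.inl (Or.inl h)
      · rcases List.suffix_cons_iff.1 ht with rfl | ht'
        · exact Or.inl (Or.inr ⟨p, hp, rfl, hany⟩)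
        · exact Or.inr ⟨p, hp, rfl, t, ht', htne, hany⟩

-- the scanned condition for one aspect equals A's substring test
lemma pv_cond_eq (cs : List Char) (p : String × List String) (hp : p ∈ pvAspects) :
    (!(PySem.Set.contains (pvScan cs PySem.Set.empty) p.1)) =
    (!(p.2.any (fun kw => PySem.Chars.isIn kw.toList cs))) := by
  rw [Bool.eq_iff_iff]
  simp only [Bool.not_eq_eq_eq_not, Bool.not_true, Bool.eq_false_iff, Ne,
    PySem.Set.contains_iff, List.any_eq_true]
  rw [pv_scan_mem]
  constructor
  · intro h ⟨kw, hkw, hin⟩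
    apply h
    right
    have hinf : kw.toList <:+: cs := (PySem.Chars.isIn_iff_infix _ _).1 hin
    rcases List.infix_iff_prefix_suffix.1 hinf with ⟨t, hpre, hsuf⟩
    refine ⟨p, hp, rfl, t, hsuf, ?_, ?_⟩
    · intro h0; subst h0
      exact pv_kw_ne_nil p hp kw hkw (List.prefix_nil.1 hpre)
    · exact List.any_eq_true.2 ⟨kw, hkw, (PySem.Chars.startswith_iff _ _).2 hpre⟩
  · rintro h (hmem | ⟨q, hq, hqp, t, hsuf, htne, hany⟩)
    · simp [PySem.Set.empty] at hmem
    · have hq' : q = p := pv_names_inj q hq p hp hqp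
      subst hq'
      rcases List.any_eq_true.1 hany with ⟨kw, hkw, hsw⟩
      exact h ⟨kw, hkw, (PySem.Chars.isIn_iff_infix _ _).2
        (List.infix_iff_prefix_suffix.2 ⟨t, (PySem.Chars.startswith_iff _ _).1 hsw, hsuf⟩)⟩

-- ===== VERDICT =====
theorem identify_missing_aspects_py_spec : Claim_equal_identify_missing_aspects_py := by
  intro query results _
  unfold Spec_identify_missing_aspects_py identify_missing_aspects_py identify_missing_aspects_py_alt
  rw [PySem.List.foldl_append_if]
  simp only [List.nil_append]
  refine congrArg (List.map Prod.fst) (List.filter_congr (fun p hp => ?_)).symm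
  rw [pv_cond_eq _ p hp]
  simp only [PySem.Str.isIn_eq]
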